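-- pv_equiv track=rewrite | github.com/EthanKlocked/Algorithm | programmers/Level 3/표현가능한이진트리.py | solution
-- ===== SOURCE A (Python) =====
-- memo = {}
--
-- def binaryCheck(target):
--     if len(target) == 1: return True
--     #memo check
--     if target in memo: return memo[target]
--     #divide
--     mid = len(target)//2
--     front = target[:mid]
--     rear = target[mid+1:]
--     #end check
--     if target[mid] == "0" and (front[len(front)//2] == "1" or rear[len(rear)//2] == "1"): return False
--     if len(target) == 3: return True
--     #return: recursive
--     frontChk = binaryCheck(front)
--     rearChk = binaryCheck(rear)
--     if not front in memo: memo[front] = frontChk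
--     if not rear in memo: memo[rear] = rearChk
--     return frontChk and rearChk;
--
-- def solution(numbers):
--     answer = []
--     for i in numbers:
--         num = bin(i)[2:]
--         zeroSupply = ~len(num) & ((1 << len(bin(len(num))[2:])) - 1)
--         target = "0"*zeroSupply+num
--         answer.append(1 if binaryCheck(target) else 0)
--     return answer
-- ===== SOURCE B (Python) =====
-- def _target(n):
--     num = bin(n)[2:]
--     zeroSupply = ~len(num) & ((1 << len(bin(len(num))[2:])) - 1)
--     return "0" * zeroSupply + num
--
--
-- def _good(t, i, ch):
--     # node at 0-based index i of the in-order layout; ch = t[i]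
--     if ch != '0':
--         return True
--     j = i + 1
--     h = 0
--     while j % 2 == 0:
--         j //= 2
--         h += 1
--     if h == 0:
--         return True          # leaf
--     d = 1 << (h - 1)
--     return t[i - d] != '1' and t[i + d] != '1'
--
--
-- def solution(numbers):
--     return [1 if all(_good(t, i, ch) for t in [_target(n)] for i, ch in enumerate(t)) else 0 for n in numbers]
-- ===== Notes on version B (the rewrite author's own statement) =====
-- stated objective: alternative
-- what changed: binaryCheck's memoized divide-in-half recursion (string slicing plus a module-level memo dict) is replaced by a single linear index scan of the padded string: a node at index i is checked via the number of trailing zeros of i+1 (its height) and its two children at i±2^(h-1), with no slicing, no recursion and no memo; the bin/padding arithmetic is kept identical.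
import Mathlib
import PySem

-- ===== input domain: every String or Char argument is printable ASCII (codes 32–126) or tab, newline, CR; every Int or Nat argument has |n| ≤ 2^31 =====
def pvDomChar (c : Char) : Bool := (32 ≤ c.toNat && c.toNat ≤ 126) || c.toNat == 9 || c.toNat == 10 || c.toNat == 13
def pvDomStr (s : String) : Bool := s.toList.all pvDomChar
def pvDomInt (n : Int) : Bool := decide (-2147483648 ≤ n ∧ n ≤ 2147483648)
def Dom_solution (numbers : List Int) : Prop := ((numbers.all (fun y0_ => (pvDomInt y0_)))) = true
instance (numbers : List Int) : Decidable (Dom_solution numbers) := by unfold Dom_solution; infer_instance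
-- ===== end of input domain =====

-- B replaces the memoized divide-in-half recursion of binaryCheck by a single linear scan of the
-- padded string (trailing-zeros height, children at i±2^(h-1)); equivalence is on the return value.

-- ===== PORT A =====
-- Helpers shared by both ports: both Pythons build the padded target string with the same three lines.
-- Hand port of the binary digits of a natural (MSB first, by halving); fueled so the kernel can reduce it
-- (fuel = n suffices: n/2 < n for n ≠ 0).
def pvBitsF (fuel n : Nat) : List Char :=
  match fuel with
  | 0 => []
  | f + 1 => if n = 0 then [] else pvBitsF f (n / 2) ++ [if n % 2 = 1 then '1' else '0']

-- bin(i)[2:], exact: for i < 0 Python gives '-0b…' whose [2:] is 'b' + digits of |i|; bin(0)[2:] = "0".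
def pvBin2 (i : Int) : List Char :=
  if i < 0 then 'b' :: pvBitsF i.natAbs i.natAbs
  else if i = 0 then ['0']
  else pvBitsF i.toNat i.toNat

-- target = "0"*zeroSupply + num  with  zeroSupply = ~len(num) & ((1 << b) - 1), b = len(bin(len(num))[2:]).
-- ~L & (2^b - 1) is ported as (-L-1) mod 2^b: exact, since x & (2^b - 1) = x mod 2^b for every int x,
-- ~L = -L-1, and 1 << b = 2^b.
def pvTarget (i : Int) : List Char :=
  let num := pvBin2 i
  let b := (pvBin2 (num.length : Int)).length
  let zs := PySem.Int.mod (-(num.length : Int) - 1) ((2 : Int) ^ b)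
  List.replicate zs.toNat '0' ++ num

-- binaryCheck with the module-level memo threaded through (fuel = len(target) suffices: each
-- recursive call is on a strictly shorter string).  Indexing uses pyGetD ' ' (in range on every
-- string binaryCheck is actually called on, so exact).
def pvBC (fuel : Nat) (t : List Char) (memo : PySem.Dict (List Char) Bool) :
    Bool × PySem.Dict (List Char) Bool :=
  match fuel with
  | 0 => (true, memo)
  | f + 1 =>
    if t.length = 1 then (true, memo) else
    match memo.get? t with
    | some v => (v, memo)
    | none =>
      let mid := t.length / 2
      let front := t.take mid
      let rear := t.drop (mid + 1)
      if PySem.List.pyGetD t (mid : Int) ' ' == '0' &&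
         (PySem.List.pyGetD front ((front.length / 2 : Nat) : Int) ' ' == '1' ||
          PySem.List.pyGetD rear ((rear.length / 2 : Nat) : Int) ' ' == '1') then (false, memo)
      else if t.length = 3 then (true, memo)
      else
        let p1 := pvBC f front memo
        let p2 := pvBC f rear p1.2
        let m3 := if (p2.2.get? front).isSome then p2.2 else p2.2.insert front p1.1
        let m4 := if (m3.get? rear).isSome then m3 else m3.insert rear p2.1
        (p1.1 && p2.1, m4)

-- The Python memo is module level; its entries always hold binaryCheck's own value, so starting
-- from the empty dict is exact for the returned list.
def solution (numbers : List Int) : List Int :=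
  (numbers.foldl
    (fun (acc : List Int × PySem.Dict (List Char) Bool) i =>
      let target := pvTarget i
      let r := pvBC target.length target acc.2
      (acc.1 ++ [if r.1 then (1 : Int) else 0], r.2))
    ([], PySem.Dict.empty)).1

-- ===== PORT B =====
-- trailing zeros of j (the while j % 2 == 0 loop of _good); fueled, fuel = j suffices.
def pvTzF (fuel j : Nat) : Nat :=
  match fuel with
  | 0 => 0
  | f + 1 => if j = 0 then 0 else if j % 2 = 0 then pvTzF f (j / 2) + 1 else 0

-- _good(t, i, ch): i comes from enumerate, so i ≥ 0 and (i+1).toNat is exactly Python's j = i + 1.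
def pvGood (t : List Char) (i : Int) (ch : Char) : Bool :=
  if ch != '0' then true
  else
    let h := pvTzF (i + 1).toNat (i + 1).toNat
    if h = 0 then true
    else
      let d : Int := (2 : Int) ^ (h - 1)   -- 1 << (h-1)
      (PySem.List.pyGetD t (i - d) ' ' != '1') && (PySem.List.pyGetD t (i + d) ' ' != '1')

def solution_alt (numbers : List Int) : List Int :=
  numbers.map (fun n =>
    let t := pvTarget n
    if (PySem.List.enumerate t 0).all (fun p => pvGood t p.1 p.2) then (1 : Int) else 0)

-- ===== PRECONDITION & SPEC =====
def Spec_solution (numbers : List Int) (out : List Int) : Prop := out = solution_alt numbers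
instance (numbers : List Int) (out : List Int) : Decidable (Spec_solution numbers out) := by unfold Spec_solution; infer_instance

-- ===== CLAIM (what is proved, stated in full; the proofs are below) =====
def Claim_equal_solution : Prop := ∀ (numbers : List Int), Dom_solution numbers → Spec_solution numbers (solution numbers)

-- ===== LEMMAS AND PROOFS =====

-- B's per-target scan, named for the proofs.
def scanB (t : List Char) : Bool :=
  (PySem.List.enumerate t 0).all (fun p => pvGood t p.1 p.2)

-- A's root test at a split f ++ c :: r, as a Bool on the pieces.
def rootOK (f r : List Char) (c : Char) : Bool :=
  !(c == '0' && (f.getD (f.length / 2) ' ' == '1' || r.getD (r.length / 2) ' ' == '1'))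

-- memo invariant: every stored value is the scan of its key, and keys have perfect length.
def ValidM (m : PySem.Dict (List Char) Bool) : Prop :=
  ∀ s v, m.get? s = some v → (∃ e, s.length + 1 = 2 ^ (e + 1)) ∧ v = scanB s

theorem pvTzF_zero (f : Nat) : pvTzF f 0 = 0 := by cases f <;> simp [pvTzF]

theorem pvTzF_congr (f g j : Nat) (hf : j ≤ f) (hg : j ≤ g) : pvTzF f j = pvTzF g j := by
  induction f using Nat.strong_induction_on generalizing g j with
  | _ f ih =>
    match f, g with
    | 0, _ => have : j = 0 := by omega
              simp [this, pvTzF, pvTzF_zero]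
    | f + 1, 0 => have : j = 0 := by omega
                  simp [this, pvTzF, pvTzF_zero]
    | f + 1, g + 1 =>
      simp only [pvTzF]
      by_cases h0 : j = 0
      · simp [h0]
      · by_cases h2 : j % 2 = 0
        · simp only [h0, h2, if_true, if_false]
          rw [ih f (by omega) (j := j / 2) g (by omega) (by omega)]
        · simp [h0, h2]

theorem pvTz_def (j f : Nat) (hf : j ≤ f) :
    pvTzF f j = if j = 0 then 0 else if j % 2 = 0 then pvTzF (j / 2) (j / 2) + 1 else 0 := by
  match f with
  | 0 => interval_cases j <;> simp [pvTzF]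
  | f + 1 =>
    simp only [pvTzF]
    by_cases h0 : j = 0
    · simp [h0]
    · by_cases h2 : j % 2 = 0
      · simp only [h0, h2, if_true, if_false]
        rw [pvTzF_congr f (j / 2) (j / 2) (by omega) le_rfl]
      · simp [h0, h2]

theorem pvTz_pow (k : Nat) : pvTzF (2 ^ k) (2 ^ k) = k := by
  induction k with
  | zero => simp [pvTzF]
  | succ k ih =>
    rw [pvTz_def _ _ le_rfl]
    have h1 : 2 ^ (k + 1) ≠ 0 := by positivity
    have h2 : 2 ^ (k + 1) % 2 = 0 := by
      simp [pow_succ, Nat.mul_mod_left]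
    have h3 : 2 ^ (k + 1) / 2 = 2 ^ k := by
      rw [pow_succ]; omega
    simp [h1, h2, h3, ih]

theorem pvTz_dvd (j : Nat) : 2 ^ pvTzF j j ∣ j := by
  induction j using Nat.strong_induction_on with
  | _ j ih =>
    rw [pvTz_def _ _ le_rfl]
    by_cases h0 : j = 0
    · simp [h0]
    · by_cases h2 : j % 2 = 0
      · simp only [h0, h2, if_true, if_false]
        have := ih (j / 2) (by omega)
        rw [pow_succ]
        obtain ⟨q, hq⟩ := this
        refine ⟨q, ?_⟩
        have h2q : 2 ^ pvTzF (j / 2) (j / 2) * 2 * q = 2 * (2 ^ pvTzF (j / 2) (j / 2) * q) := by ring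
        rw [h2q, ← hq]; omega
      · simp [h0, h2]

theorem pvTz_shift (j e : Nat) (h1 : 1 ≤ j) (h2 : j < 2 ^ e) :
    pvTzF (j + 2 ^ e) (j + 2 ^ e) = pvTzF j j := by
  induction j using Nat.strong_induction_on generalizing e with
  | _ j ih =>
    have he1 : 1 ≤ e := by
      by_contra h; interval_cases e <;> omega
    obtain ⟨e', rfl⟩ : ∃ e', e = e' + 1 := ⟨e - 1, by omega⟩
    have hps : (2 : Nat) ^ (e' + 1) = 2 ^ e' * 2 := pow_succ 2 e'
    rw [pvTz_def (j + 2 ^ (e' + 1)) _ le_rfl, pvTz_def j _ le_rfl]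
    have hpe : 2 ^ (e' + 1) % 2 = 0 := by omega
    by_cases h2' : j % 2 = 0
    · have hm : (j + 2 ^ (e' + 1)) % 2 = 0 := by omega
      have hj0 : j ≠ 0 := by omega
      have hs0 : j + 2 ^ (e' + 1) ≠ 0 := by positivity
      simp only [hj0, hs0, hm, h2', if_true, if_false]
      have hd : (j + 2 ^ (e' + 1)) / 2 = j / 2 + 2 ^ e' := by omega
      rw [hd]
      have hj2 : 1 ≤ j / 2 := by omega
      have hlt : j / 2 < 2 ^ e' := by omega
      rw [ih (j / 2) (by omega) e' hj2 hlt]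
    · have hm : (j + 2 ^ (e' + 1)) % 2 ≠ 0 := by omega
      have hj0 : j ≠ 0 := by omega
      have hs0 : j + 2 ^ (e' + 1) ≠ 0 := by positivity
      simp [hj0, hs0, hm, h2']

theorem tz_bounds (j e h : Nat) (h1 : 1 ≤ j) (h2 : j < 2 ^ e) (htz : pvTzF j j = h + 1) :
    2 ^ h < j ∧ j + 2 ^ h ≤ 2 ^ e - 1 := by
  have hdvd : 2 ^ (h + 1) ∣ j := htz ▸ pvTz_dvd j
  obtain ⟨q, rfl⟩ := hdvd
  have hq1 : 1 ≤ q := by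
    rcases Nat.eq_zero_or_pos q with hq | hq
    · subst hq; simp at h1
    · exact hq
  have hlow : 2 ^ h < 2 ^ (h + 1) * q := by
    have hs : 2 ^ h < 2 ^ (h + 1) := Nat.pow_lt_pow_succ (by omega)
    calc 2 ^ h < 2 ^ (h + 1) := hs
    _ ≤ 2 ^ (h + 1) * q := Nat.le_mul_of_pos_right _ hq1
  refine ⟨hlow, ?_⟩
  have hle : h + 1 ≤ e := by
    by_contra hc
    have hx : 2 ^ e ≤ 2 ^ (h + 1) := Nat.pow_le_pow_right (by omega) (by omega)
    have hy : 2 ^ (h + 1) ≤ 2 ^ (h + 1) * q := Nat.le_mul_of_pos_right _ hq1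
    omega
  obtain ⟨s, rfl⟩ : ∃ s, e = (h + 1) + s := ⟨e - (h + 1), by omega⟩
  have hq2 : q < 2 ^ s := by
    by_contra hc
    have hx : 2 ^ (h + 1) * 2 ^ s ≤ 2 ^ (h + 1) * q := Nat.mul_le_mul_left _ (by omega)
    rw [← pow_add] at hx
    omega
  have hph : 1 ≤ 2 ^ h := Nat.one_le_two_pow
  have h2s : 1 ≤ 2 ^ s := Nat.one_le_two_pow
  have t1 : 2 ^ (h + 1) * q = 2 * (2 ^ h * q) := by rw [pow_succ]; ring
  have e2 : (2 : Nat) ^ (h + 1 + s) = 2 * (2 ^ h * 2 ^ s) := by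
    rw [pow_add, pow_succ]; ring
  have t2 : 2 ^ h * q ≤ 2 ^ h * (2 ^ s - 1) := Nat.mul_le_mul_left _ (by omega)
  have t3 : 2 ^ h * (2 ^ s - 1) = 2 ^ h * 2 ^ s - 2 ^ h := by
    rw [Nat.mul_sub, mul_one]
  rw [t1, e2]
  omega

theorem scan_iff (t : List Char) :
    scanB t = true ↔ ∀ (k : Nat), k < t.length → pvGood t (k : Int) (t.getD k ' ') = true := by
  rw [scanB, List.all_eq_true]
  constructor
  · intro H k hk
    have := H ((k : Int), t[k]) (by
      rw [PySem.List.mem_enumerate_iff]; exact ⟨k, hk, by simp⟩)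
    rw [List.getD_eq_getElem _ _ hk]
    simpa using this
  · intro H p hp
    rw [PySem.List.mem_enumerate_iff] at hp
    obtain ⟨k, hk, rfl⟩ := hp
    have := H k hk
    rw [List.getD_eq_getElem _ _ hk] at this
    simpa using this

theorem scanB_singleton (c : Char) : scanB [c] = true := by
  rw [scan_iff]
  intro k hk
  simp only [List.length_singleton] at hk
  interval_cases k
  simp [pvGood, pvTzF]

theorem pyGetD_append_lt (f rest : List Char) (m : Nat) (hm : m < f.length) :
    PySem.List.pyGetD (f ++ rest) (m : Int) ' ' = PySem.List.pyGetD f (m : Int) ' ' := by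
  rw [PySem.List.pyGetD_natCast, PySem.List.pyGetD_natCast, List.getD_append _ _ _ _ hm]

theorem pyGetD_append_cons (f r : List Char) (c : Char) (m : Nat) (hm : m < r.length) :
    PySem.List.pyGetD (f ++ c :: r) ((f.length + 1 + m : Nat) : Int) ' '
      = PySem.List.pyGetD r (m : Int) ' ' := by
  rw [PySem.List.pyGetD_natCast, PySem.List.pyGetD_natCast]
  rw [List.getD_append_right _ _ _ _ (by omega)]
  have : f.length + 1 + m - f.length = m + 1 := by omega
  rw [this, List.getD_cons_succ]

theorem good_left (f rest : List Char) (e k : Nat) (ch : Char)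
    (hf : f.length + 1 = 2 ^ e) (hk : k < f.length) :
    pvGood (f ++ rest) (k : Int) ch = pvGood f (k : Int) ch := by
  rw [pvGood, pvGood]
  by_cases hch : (ch != '0') = true
  · simp [hch]
  · simp only [Bool.not_eq_true] at hch
    simp only [hch, if_false]
    have hjn : ((k : Int) + 1).toNat = k + 1 := by omega
    rw [hjn]
    by_cases hz : pvTzF (k + 1) (k + 1) = 0
    · simp [hz]
    · obtain ⟨h', hh⟩ : ∃ h', pvTzF (k + 1) (k + 1) = h' + 1 := ⟨pvTzF (k + 1) (k + 1) - 1, by omega⟩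
      have hb := tz_bounds (k + 1) e h' (by omega) (by
        generalize (2 : Nat) ^ e = B at *; omega) hh
      have hA1 : k - 2 ^ h' < f.length := by
        generalize (2 : Nat) ^ h' = A at hb ⊢; omega
      have hA2 : k + 2 ^ h' < f.length := by
        generalize (2 : Nat) ^ h' = A at hb ⊢; generalize (2 : Nat) ^ e = B at *; omega
      have hlo : 2 ^ h' ≤ k := by
        generalize (2 : Nat) ^ h' = A at hb ⊢; omega
      simp only [hh, if_neg (by omega : ¬ h' + 1 = 0), Nat.add_sub_cancel]
      have c1 : (k : Int) - (2 : Int) ^ h' = ((k - 2 ^ h' : Nat) : Int) := by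
        push_cast [hlo]; ring
      have c2 : (k : Int) + (2 : Int) ^ h' = ((k + 2 ^ h' : Nat) : Int) := by
        push_cast; ring
      rw [c1, c2, pyGetD_append_lt _ _ _ hA1, pyGetD_append_lt _ _ _ hA2]

theorem good_right (f r : List Char) (c : Char) (e k : Nat) (ch : Char)
    (hf : f.length + 1 = 2 ^ e) (hr : r.length + 1 = 2 ^ e) (hk : k < r.length) :
    pvGood (f ++ c :: r) ((f.length + 1 + k : Nat) : Int) ch = pvGood r (k : Int) ch := by
  rw [pvGood, pvGood]
  by_cases hch : (ch != '0') = true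
  · simp [hch]
  · simp only [Bool.not_eq_true] at hch
    simp only [hch, if_false]
    have hjn : (((f.length + 1 + k : Nat) : Int) + 1).toNat = (k + 1) + 2 ^ e := by
      generalize (2 : Nat) ^ e = B at *; omega
    have hjk : ((k : Int) + 1).toNat = k + 1 := by omega
    rw [hjn, hjk, pvTz_shift (k + 1) e (by omega) (by
      generalize (2 : Nat) ^ e = B at *; omega)]
    by_cases hz : pvTzF (k + 1) (k + 1) = 0
    · simp [hz]
    · obtain ⟨h', hh⟩ : ∃ h', pvTzF (k + 1) (k + 1) = h' + 1 := ⟨pvTzF (k + 1) (k + 1) - 1, by omega⟩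
      have hb := tz_bounds (k + 1) e h' (by omega) (by
        generalize (2 : Nat) ^ e = B at *; omega) hh
      have hlo : 2 ^ h' ≤ k := by
        generalize (2 : Nat) ^ h' = A at hb ⊢; omega
      have hA1 : k - 2 ^ h' < r.length := by
        generalize (2 : Nat) ^ h' = A at hb ⊢; omega
      have hA2 : k + 2 ^ h' < r.length := by
        generalize (2 : Nat) ^ h' = A at hb ⊢; generalize (2 : Nat) ^ e = B at *; omega
      simp only [hh, if_neg (by omega : ¬ h' + 1 = 0), Nat.add_sub_cancel]
      have c1 : ((f.length + 1 + k : Nat) : Int) - (2 : Int) ^ h'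
          = ((f.length + 1 + (k - 2 ^ h') : Nat) : Int) := by
        push_cast [hlo]; ring
      have c2 : ((f.length + 1 + k : Nat) : Int) + (2 : Int) ^ h'
          = ((f.length + 1 + (k + 2 ^ h') : Nat) : Int) := by
        push_cast; ring
      have c3 : (k : Int) - (2 : Int) ^ h' = ((k - 2 ^ h' : Nat) : Int) := by
        push_cast [hlo]; ring
      have c4 : (k : Int) + (2 : Int) ^ h' = ((k + 2 ^ h' : Nat) : Int) := by
        push_cast; ring
      rw [c1, c2, c3, c4,
        pyGetD_append_cons _ _ _ _ hA1, pyGetD_append_cons _ _ _ _ hA2]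

theorem good_mid (f r : List Char) (c : Char) (e : Nat) (he : 1 ≤ e)
    (hf : f.length + 1 = 2 ^ e) (hr : r.length + 1 = 2 ^ e) :
    pvGood (f ++ c :: r) ((f.length : Nat) : Int) c = rootOK f r c := by
  obtain ⟨e', rfl⟩ : ∃ e', e = e' + 1 := ⟨e - 1, by omega⟩
  rw [pvGood, rootOK]
  by_cases hch : (c != '0') = true
  · have hc0 : (c == '0') = false := by
      simp only [bne_iff_ne, ne_eq] at hch; simp [hch]
    simp [hch, hc0]
  · simp only [Bool.not_eq_true] at hch
    have hc0 : (c == '0') = true := by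
      simp only [bne_eq_false_iff_eq] at hch; simp [hch]
    simp only [hch, if_false, hc0, Bool.true_and]
    have hjn : (((f.length : Nat) : Int) + 1).toNat = 2 ^ (e' + 1) := by
      generalize (2 : Nat) ^ (e' + 1) = B at *; omega
    rw [hjn, pvTz_pow (e' + 1)]
    simp only [if_neg (by omega : ¬ e' + 1 = 0), Nat.add_sub_cancel]
    have hpe : (2 : Nat) ^ (e' + 1) = 2 * 2 ^ e' := by rw [pow_succ]; ring
    have h1 : (1 : Nat) ≤ 2 ^ e' := Nat.one_le_two_pow
    have hfc : (f.length : Int) = 2 * (2 : Int) ^ e' - 1 := by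
      have h' : (f.length : Int) + 1 = 2 * (2 : Int) ^ e' := by
        exact_mod_cast hf.trans hpe
      linarith
    have c1 : ((f.length : Nat) : Int) - (2 : Int) ^ e' = ((2 ^ e' - 1 : Nat) : Int) := by
      push_cast [h1]
      rw [hfc]; ring
    have c2 : ((f.length : Nat) : Int) + (2 : Int) ^ e'
        = ((f.length + 1 + (2 ^ e' - 1) : Nat) : Int) := by
      push_cast [h1]; ring
    have hfl : f.length / 2 = 2 ^ e' - 1 := by
      generalize (2 : Nat) ^ e' = A at hpe h1 ⊢
      generalize (2 : Nat) ^ (e' + 1) = B at *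
      omega
    have hrl : r.length / 2 = 2 ^ e' - 1 := by
      generalize (2 : Nat) ^ e' = A at hpe h1 ⊢
      generalize (2 : Nat) ^ (e' + 1) = B at *
      omega
    have hlt : (2 ^ e' - 1 : Nat) < f.length := by
      generalize (2 : Nat) ^ e' = A at hpe h1 ⊢
      generalize (2 : Nat) ^ (e' + 1) = B at *
      omega
    have hltr : (2 ^ e' - 1 : Nat) < r.length := by
      generalize (2 : Nat) ^ e' = A at hpe h1 ⊢
      generalize (2 : Nat) ^ (e' + 1) = B at *
      omega
    rw [c1, c2, pyGetD_append_cons _ _ _ _ hltr, pyGetD_append_lt _ _ _ hlt]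
    rw [PySem.List.pyGetD_natCast, PySem.List.pyGetD_natCast, hfl, hrl]
    simp only [bne, Bool.not_or]
    simp

theorem getD_mid (f r : List Char) (c : Char) :
    (f ++ c :: r).getD f.length ' ' = c := by
  rw [List.getD_append_right _ _ _ _ le_rfl, Nat.sub_self, List.getD_cons_zero]

theorem getD_right (f r : List Char) (c : Char) (k : Nat) :
    (f ++ c :: r).getD (f.length + 1 + k) ' ' = r.getD k ' ' := by
  rw [List.getD_append_right _ _ _ _ (by omega)]
  have h : f.length + 1 + k - f.length = k + 1 := by omega
  rw [h, List.getD_cons_succ]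

theorem scan_split (f r : List Char) (c : Char) (e : Nat) (he : 1 ≤ e)
    (hf : f.length + 1 = 2 ^ e) (hr : r.length + 1 = 2 ^ e) :
    scanB (f ++ c :: r) = (rootOK f r c && (scanB f && scanB r)) := by
  have hlen : (f ++ c :: r).length = f.length + 1 + r.length := by
    simp [List.length_append]; omega
  have key : scanB (f ++ c :: r) = true ↔
      (rootOK f r c && (scanB f && scanB r)) = true := by
    rw [Bool.and_eq_true, Bool.and_eq_true, scan_iff, scan_iff, scan_iff]
    constructor
    · intro H
      refine ⟨?_, ?_, ?_⟩
      · have h := H f.length (by omega)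
        rw [getD_mid, good_mid f r c e he hf hr] at h
        exact h
      · intro k hk
        have h := H k (by omega)
        rw [List.getD_append _ _ _ _ hk, good_left f (c :: r) e k _ hf hk] at h
        exact h
      · intro k hk
        have h := H (f.length + 1 + k) (by omega)
        rw [getD_right, good_right f r c e k _ hf hr hk] at h
        exact h
    · rintro ⟨hroot, hF, hR⟩ k hk
      rw [hlen] at hk
      by_cases h1 : k < f.length
      · rw [List.getD_append _ _ _ _ h1, good_left f (c :: r) e k _ hf h1]
        exact hF k h1
      · by_cases h2 : k = f.length
        · subst h2
          rw [getD_mid, good_mid f r c e he hf hr]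
          exact hroot
        · obtain ⟨j, rfl⟩ : ∃ j, k = f.length + 1 + j := ⟨k - (f.length + 1), by omega⟩
          have hj : j < r.length := by omega
          rw [getD_right, good_right f r c e j _ hf hr hj]
          exact hR j hj
  cases hb : (rootOK f r c && (scanB f && scanB r))
  · rw [hb] at key
    rcases hx : scanB (f ++ c :: r) with _ | _
    · rfl
    · exact absurd (key.mp hx) (by simp)
  · exact key.mpr hb

theorem ValidM_step (d : PySem.Dict (List Char) Bool) (s : List Char) (v : Bool)
    (hd : ValidM d) (hs : ∃ e, s.length + 1 = 2 ^ (e + 1)) (hv : v = scanB s) :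
    ValidM (if (d.get? s).isSome then d else d.insert s v) := by
  split_ifs with h
  · exact hd
  · intro s' v' h'
    rw [PySem.Dict.get?_insert] at h'
    split_ifs at h' with he
    · subst he
      injection h' with h''
      exact ⟨hs, by rw [← h'']; exact hv⟩
    · exact hd s' v' h'

theorem bc_correct (fuel : Nat) : ∀ (t : List Char) (m : PySem.Dict (List Char) Bool),
    t.length ≤ fuel → (∃ e, t.length + 1 = 2 ^ (e + 1)) → ValidM m →
    (pvBC fuel t m).1 = scanB t ∧ ValidM (pvBC fuel t m).2 := by
  induction fuel with
  | zero =>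
    intro t m hle hper hv
    exfalso
    obtain ⟨e, he⟩ := hper
    have h2 : (2 : Nat) ^ (e + 1) = 2 * 2 ^ e := by rw [pow_succ]; ring
    have h1 : (1 : Nat) ≤ 2 ^ e := Nat.one_le_two_pow
    generalize (2 : Nat) ^ e = A at *
    generalize (2 : Nat) ^ (e + 1) = B at *
    omega
  | succ fl ih =>
    intro t m hle hper hv
    obtain ⟨e, he⟩ := hper
    have hp2 : (2 : Nat) ^ (e + 1) = 2 * 2 ^ e := by rw [pow_succ]; ring
    have h1A : (1 : Nat) ≤ 2 ^ e := Nat.one_le_two_pow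
    simp only [pvBC]
    by_cases h1 : t.length = 1
    · obtain ⟨a, rfl⟩ := List.length_eq_one_iff.mp h1
      simpa using ⟨scanB_singleton a, hv⟩
    · simp only [h1, if_false]
      have hee : 1 ≤ e := by
        rcases Nat.eq_zero_or_pos e with h | h
        · subst h; simp at he; omega
        · exact h
      cases hg : m.get? t with
      | some v =>
        simp only [hg]
        exact ⟨(hv t v hg).2, hv⟩
      | none =>
        simp only [hg]
        have hmid : t.length / 2 < t.length := by
          generalize (2 : Nat) ^ e = A at *
          generalize (2 : Nat) ^ (e + 1) = B at *
          omega
        have ht : t = t.take (t.length / 2) ++ t[t.length / 2] :: t.drop (t.length / 2 + 1) := by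
          conv_lhs => rw [← List.take_append_drop (t.length / 2) t]
          rw [List.drop_eq_getElem_cons hmid]
        have hFlen : (t.take (t.length / 2)).length + 1 = 2 ^ e := by
          rw [List.length_take]
          generalize (2 : Nat) ^ e = A at *
          generalize (2 : Nat) ^ (e + 1) = B at *
          omega
        have hRlen : (t.drop (t.length / 2 + 1)).length + 1 = 2 ^ e := by
          rw [List.length_drop]
          generalize (2 : Nat) ^ e = A at *
          generalize (2 : Nat) ^ (e + 1) = B at *
          omega
        have hscan : scanB t =
            (rootOK (t.take (t.length / 2)) (t.drop (t.length / 2 + 1)) t[t.length / 2] &&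
              (scanB (t.take (t.length / 2)) && scanB (t.drop (t.length / 2 + 1)))) := by
          conv_lhs => rw [ht]
          exact scan_split _ _ _ e hee hFlen hRlen
        have hcond : (PySem.List.pyGetD t ((t.length / 2 : Nat) : Int) ' ' == '0' &&
              (PySem.List.pyGetD (t.take (t.length / 2))
                  (((t.take (t.length / 2)).length / 2 : Nat) : Int) ' ' == '1' ||
               PySem.List.pyGetD (t.drop (t.length / 2 + 1))
                  (((t.drop (t.length / 2 + 1)).length / 2 : Nat) : Int) ' ' == '1'))
            = !(rootOK (t.take (t.length / 2)) (t.drop (t.length / 2 + 1)) t[t.length / 2]) := by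
          rw [rootOK, Bool.not_not]
          rw [PySem.List.pyGetD_natCast, PySem.List.pyGetD_natCast, PySem.List.pyGetD_natCast]
          rw [List.getD_eq_getElem _ _ hmid]
        rw [hcond]
        by_cases hc : (!(rootOK (t.take (t.length / 2)) (t.drop (t.length / 2 + 1))
            t[t.length / 2])) = true
        · simp only [hc, if_true]
          refine ⟨?_, hv⟩
          rw [hscan]
          simp only [Bool.not_eq_true'] at hc
          rw [hc]
          rfl
        · simp only [hc, if_false]
          have hroot : rootOK (t.take (t.length / 2)) (t.drop (t.length / 2 + 1))
              t[t.length / 2] = true := by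
            revert hc
            cases rootOK (t.take (t.length / 2)) (t.drop (t.length / 2 + 1)) t[t.length / 2] <;>
              simp
          by_cases h3 : t.length = 3
          · simp only [h3, if_true]
            refine ⟨?_, hv⟩
            have he1 : e = 1 := by
              have : (2 : Nat) ^ (e + 1) = 4 := by omega
              have h4 : (2 : Nat) ^ (e + 1) = 2 ^ 2 := by rw [this]; decide
              have := Nat.pow_right_injective (le_refl 2) h4
              omega
            subst he1
            obtain ⟨a, hFa⟩ := List.length_eq_one_iff.mp (show (t.take (t.length / 2)).length = 1 by omega)
            obtain ⟨b, hRb⟩ := List.length_eq_one_iff.mp (show (t.drop (t.length / 2 + 1)).length = 1 by omega)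
            rw [hscan, hroot, hFa, hRb, scanB_singleton, scanB_singleton]
            rfl
          · simp only [h3, if_false]
            have hfF : (t.take (t.length / 2)).length ≤ fl := by
              rw [List.length_take]
              generalize (2 : Nat) ^ e = A at *
              generalize (2 : Nat) ^ (e + 1) = B at *
              omega
            have hfR : (t.drop (t.length / 2 + 1)).length ≤ fl := by
              rw [List.length_drop]
              generalize (2 : Nat) ^ e = A at *
              generalize (2 : Nat) ^ (e + 1) = B at *
              omega
            have hperF : ∃ e', (t.take (t.length / 2)).length + 1 = 2 ^ (e' + 1) :=
              ⟨e - 1, by rw [hFlen]; congr 1; omega⟩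
            have hperR : ∃ e', (t.drop (t.length / 2 + 1)).length + 1 = 2 ^ (e' + 1) :=
              ⟨e - 1, by rw [hRlen]; congr 1; omega⟩
            have IH1 := ih (t.take (t.length / 2)) m hfF hperF hv
            have IH2 := ih (t.drop (t.length / 2 + 1))
              (pvBC fl (t.take (t.length / 2)) m).2 hfR hperR IH1.2
            refine ⟨?_, ?_⟩
            · rw [hscan, hroot, IH1.1, IH2.1]
              rfl
            · exact ValidM_step _ _ _
                (ValidM_step _ _ _ IH2.2 hperF IH1.1) hperR IH2.1

theorem pvBitsF_nil (f : Nat) : pvBitsF f 0 = [] := by cases f <;> simp [pvBitsF]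

theorem pvBitsF_bound : ∀ (f n : Nat), 1 ≤ n → n ≤ f →
    n < 2 ^ (pvBitsF f n).length ∧ 1 ≤ (pvBitsF f n).length := by
  intro f
  induction f with
  | zero => intro n h1 h2; omega
  | succ f ih =>
    intro n h1 h2
    rw [pvBitsF]
    simp only [if_neg (by omega : ¬ n = 0), List.length_append, List.length_singleton]
    by_cases hn : n = 1
    · subst hn
      rw [show (1 : Nat) / 2 = 0 from rfl, pvBitsF_nil]
      simp
    · have h2n : 2 ≤ n := by omega
      have hb := ih (n / 2) (by omega) (by omega)
      have hpow : (2 : Nat) ^ ((pvBitsF f (n / 2)).length + 1)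
          = 2 * 2 ^ (pvBitsF f (n / 2)).length := by rw [pow_succ]; ring
      generalize (2 : Nat) ^ (pvBitsF f (n / 2)).length = A at *
      generalize (2 : Nat) ^ ((pvBitsF f (n / 2)).length + 1) = B at *
      omega

theorem pvBin2_len_pos (i : Int) : 1 ≤ (pvBin2 i).length := by
  rw [pvBin2]
  split_ifs with h1 h2
  · simp
  · simp
  · have hn : 1 ≤ i.toNat := by omega
    exact (pvBitsF_bound _ _ hn le_rfl).2

theorem pvBin2_natCast (L : Nat) (hL : 1 ≤ L) : pvBin2 (L : Int) = pvBitsF L L := by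
  rw [pvBin2, if_neg (by omega), if_neg (by omega)]
  simp

theorem target_perfect (i : Int) : ∃ e, (pvTarget i).length + 1 = 2 ^ (e + 1) := by
  simp only [pvTarget]
  set L := (pvBin2 i).length with hLdef
  have hL : 1 ≤ L := pvBin2_len_pos i
  rw [pvBin2_natCast L hL]
  set b := (pvBitsF L L).length with hbdef
  obtain ⟨hlt, hb1⟩ := pvBitsF_bound L L hL le_rfl
  rw [← hbdef] at hlt hb1
  refine ⟨b - 1, ?_⟩
  have hpos : (0 : Int) < (2 : Int) ^ b := by positivity
  have hcastp : ((2 ^ b : Nat) : Int) = (2 : Int) ^ b := by push_cast; rfl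
  have hLi : (L : Int) < (2 : Int) ^ b := by
    rw [← hcastp]; exact_mod_cast hlt
  have hmod : PySem.Int.mod (-(L : Int) - 1) ((2 : Int) ^ b)
      = (2 : Int) ^ b - 1 - L := by
    rw [PySem.Int.mod_eq_emod_of_pos hpos]
    have h1 : (-(L : Int) - 1) = ((2 : Int) ^ b - 1 - L) + ((2 : Int) ^ b) * (-1) := by ring
    rw [h1, Int.add_mul_emod_self_left]
    exact Int.emod_eq_of_lt (by omega) (by omega)
  rw [hmod]
  have hzn : ((2 : Int) ^ b - 1 - L).toNat = 2 ^ b - 1 - L := by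
    rw [← hcastp]; omega
  rw [List.length_append, List.length_replicate, hzn]
  have hbe : 2 ^ (b - 1 + 1) = 2 ^ b := by congr 1; omega
  rw [hbe]
  generalize (2 : Nat) ^ b = A at *
  omega

theorem fold_spec (ns : List Int) : ∀ (acc : List Int) (m : PySem.Dict (List Char) Bool), ValidM m →
    (ns.foldl
      (fun (acc : List Int × PySem.Dict (List Char) Bool) i =>
        let target := pvTarget i
        let r := pvBC target.length target acc.2
        (acc.1 ++ [if r.1 then (1 : Int) else 0], r.2))
      (acc, m)).1
    = acc ++ ns.map (fun n => if scanB (pvTarget n) then (1 : Int) else 0) := by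
  induction ns with
  | nil => intro acc m _; simp
  | cons n ns ih =>
    intro acc m hv
    have hbc := bc_correct (pvTarget n).length (pvTarget n) m le_rfl (target_perfect n) hv
    simp only [List.foldl_cons, List.map_cons]
    rw [ih _ _ hbc.2, hbc.1]
    simp

-- ===== VERDICT (by name: the statement is the Claim_ definition above) =====
theorem solution_spec : Claim_equal_solution := by
  intro numbers _
  unfold Spec_solution solution solution_alt
  rw [fold_spec numbers [] PySem.Dict.empty (by intro s v h; simp [PySem.Dict.get?_empty] at h)]
  simp [scanB]
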